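-- pv_equiv track=rewrite | github.com/koka-land/py_base | ! kompege/ЕГЭ/Задания/t_05/22457.py | v7
-- ===== SOURCE A (Python) =====
-- def v7(x):
--     r = ''
--     s = 0
--     while x > 0:
--         r = str(x % 7) + r
--         s += x % 7
--         x //= 7
--     return r, s
-- ===== SOURCE B (Python) =====
-- def v7(x):
--     if x <= 0:
--         return '', 0
--     r, s = v7(x // 7)
--     return r + str(x % 7), s + x % 7
-- ===== Notes on version B (the rewrite author's own statement) =====
-- stated objective: alternative
-- what changed: Replaces the while loop that prepends digits while mutating r and s with a recursion on the base-seven quotient that builds the representation most-significant-digit first and threads the digit sum through the return value.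
import Mathlib
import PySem

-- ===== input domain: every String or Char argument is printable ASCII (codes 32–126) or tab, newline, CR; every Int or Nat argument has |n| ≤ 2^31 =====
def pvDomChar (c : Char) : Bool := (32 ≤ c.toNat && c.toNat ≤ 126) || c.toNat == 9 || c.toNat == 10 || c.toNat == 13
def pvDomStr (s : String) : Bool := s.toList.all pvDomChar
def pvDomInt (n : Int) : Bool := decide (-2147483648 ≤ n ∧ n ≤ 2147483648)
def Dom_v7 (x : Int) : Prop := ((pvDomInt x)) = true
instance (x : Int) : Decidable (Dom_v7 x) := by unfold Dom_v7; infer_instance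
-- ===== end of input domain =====

-- B replaces A's digit-prepending while loop by a recursion on x // 7 that builds the
-- base-7 string most-significant-digit first and returns the digit sum alongside it.

-- ===== PORT A =====
-- A's while loop: state (x, r, s); each iteration prepends str(x % 7) and adds x % 7.
def v7Loop (x : Int) (r : String) (s : Int) : String × Int :=
  if _h : x > 0 then
    v7Loop (PySem.Int.floordiv x 7) (PySem.Int.toStr (PySem.Int.mod x 7) ++ r) (s + PySem.Int.mod x 7)
  else (r, s)
termination_by x.toNat
decreasing_by
  rw [PySem.Int.floordiv_eq_ediv_of_pos (by norm_num)]
  omega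

def v7 (x : Int) : String × Int := v7Loop x "" 0

-- ===== PORT B =====
def v7_alt (x : Int) : String × Int :=
  if _h : x ≤ 0 then ("", 0)
  else
    let p := v7_alt (PySem.Int.floordiv x 7)
    (p.1 ++ PySem.Int.toStr (PySem.Int.mod x 7), p.2 + PySem.Int.mod x 7)
termination_by x.toNat
decreasing_by
  rw [PySem.Int.floordiv_eq_ediv_of_pos (by norm_num)]
  omega

-- ===== PRECONDITION & SPEC =====
def Spec_v7 (x : Int) (out : String × Int) : Prop := out = v7_alt x
instance (x : Int) (out : String × Int) : Decidable (Spec_v7 x out) := by unfold Spec_v7; infer_instance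

-- ===== CLAIM =====
def Claim_equal_v7 : Prop := ∀ (x : Int), Dom_v7 x → Spec_v7 x (v7 x)

-- ===== LEMMAS AND PROOFS =====
-- Loop/recursion correspondence: A's loop with accumulators (r, s) computes B's result
-- appended/added to the accumulators.
theorem v7Loop_eq_alt : ∀ (n : Nat) (x : Int), x.toNat ≤ n → ∀ (r : String) (s : Int),
    v7Loop x r s = ((v7_alt x).1 ++ r, (v7_alt x).2 + s) := by
  intro n
  induction n with
  | zero =>
    intro x hx r s
    have hx0 : ¬ x > 0 := by omega
    rw [v7Loop, v7_alt]
    simp [hx0, show x ≤ 0 by omega]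
  | succ n ih =>
    intro x hx r s
    by_cases hpos : x > 0
    · have hq : (PySem.Int.floordiv x 7).toNat ≤ n := by
        rw [PySem.Int.floordiv_eq_ediv_of_pos (by norm_num)]
        omega
      rw [v7Loop, v7_alt]
      simp only [hpos, show ¬ x ≤ 0 by omega, dif_pos, dif_neg, not_false_iff]
      rw [ih _ hq]
      refine Prod.ext ?_ ?_
      · simp [String.append_assoc]
      · simp; ring
    · rw [v7Loop, v7_alt]
      simp [hpos, show x ≤ 0 by omega]

-- ===== VERDICT =====
theorem v7_spec : Claim_equal_v7 := by
  intro x _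
  unfold Spec_v7 v7
  rw [v7Loop_eq_alt x.toNat x le_rfl]
  simp
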